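-- pv_equiv track=rewrite | github.com/JBRS307/WDI | list3/zad16.py | oneMax
-- ===== SOURCE A (Python) =====
-- def oneMax(arr, n):
--     maxi = arr[0]
--     flag = True
--
--     for i in range(1, n):
--         if arr[i] > maxi:
--             maxi = arr[i]
--             flag = True
--         elif arr[i] == maxi:
--             flag = False
--
--     return flag
-- ===== SOURCE B (Python) =====
-- def oneMax(arr, n):
--     prefix = [arr[0]] + [arr[i] for i in range(1, n)]
--     m = max(prefix)
--     return prefix.count(m) == 1
-- ===== Notes on version B (the rewrite author's own statement) =====
-- stated objective: simpler
-- what changed: Replaces A's single pass carrying a coupled (running max, uniqueness flag) state by materializing the examined prefix and using the built-ins max and count, returning count == 1.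
import Mathlib
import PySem

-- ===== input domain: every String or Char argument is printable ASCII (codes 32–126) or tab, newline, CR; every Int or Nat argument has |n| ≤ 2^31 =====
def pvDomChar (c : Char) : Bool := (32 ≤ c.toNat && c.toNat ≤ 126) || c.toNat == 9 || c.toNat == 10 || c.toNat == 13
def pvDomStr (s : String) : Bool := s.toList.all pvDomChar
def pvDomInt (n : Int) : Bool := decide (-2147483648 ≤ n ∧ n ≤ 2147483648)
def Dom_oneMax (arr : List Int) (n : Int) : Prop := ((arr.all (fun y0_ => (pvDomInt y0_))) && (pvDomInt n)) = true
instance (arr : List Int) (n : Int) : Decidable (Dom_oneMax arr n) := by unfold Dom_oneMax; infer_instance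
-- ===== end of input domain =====

-- B replaces A's single pass carrying a coupled (running max, uniqueness flag) state by
-- materializing the examined prefix and using built-in max and count (simpler).


-- ===== PORT A =====
def oneMax (arr : List Int) (n : Int) : Bool :=
  ((PySem.List.pyRange 1 n 1).foldl
    (fun (s : Int × Bool) i =>
      if PySem.List.pyGetD arr i 0 > s.1 then (PySem.List.pyGetD arr i 0, true)
      else if PySem.List.pyGetD arr i 0 = s.1 then (s.1, false)
      else s)
    (PySem.List.pyGetD arr 0 0, true)).2

-- ===== PORT B =====
-- prefix = [arr[0]] + [arr[i] for i in range(1, n)]; max(prefix) is PySem.List.max? (first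
-- maximal element); prefix is nonempty (a cons), so .getD 0 only discharges the Option.
def oneMax_alt (arr : List Int) (n : Int) : Bool :=
  let pre := PySem.List.pyGetD arr 0 0 ::
    (PySem.List.pyRange 1 n 1).map (fun i => PySem.List.pyGetD arr i 0)
  let m := (PySem.List.max? pre (fun x => x)).getD 0
  decide (PySem.List.count pre m = 1)

-- ===== PRECONDITION & SPEC =====
-- Pre_ excludes exactly the inputs where both Pythons raise IndexError: empty arr (arr[0]) or n > len(arr).
def Pre_oneMax (arr : List Int) (n : Int) : Prop := arr ≠ [] ∧ n ≤ (arr.length : Int)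
instance (arr : List Int) (n : Int) : Decidable (Pre_oneMax arr n) := by unfold Pre_oneMax; infer_instance
def pvWitness_oneMax : List Int × Int := ([1, 2], 2)

def Spec_oneMax (arr : List Int) (n : Int) (out : Bool) : Prop := out = oneMax_alt arr n
instance (arr : List Int) (n : Int) (out : Bool) : Decidable (Spec_oneMax arr n out) := by unfold Spec_oneMax; infer_instance

-- ===== CLAIM (what is proved, stated in full; the proofs are below) =====
def Claim_equal_oneMax : Prop := ∀ (arr : List Int) (n : Int), Dom_oneMax arr n → Pre_oneMax arr n → Spec_oneMax arr n (oneMax arr n)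

-- ===== LEMMAS AND PROOFS =====

/-- A's loop body, on values. -/
def stepA (s : Int × Bool) (x : Int) : Int × Bool :=
  if x > s.1 then (x, true) else if x = s.1 then (s.1, false) else s

/-- The running-maximum step. -/
def stepM (m x : Int) : Int := if x > m then x else m

theorem le_foldM (vs : List Int) (m : Int) : m ≤ vs.foldl stepM m := by
  induction vs generalizing m with
  | nil => exact le_refl m
  | cons x vs ih =>
    simp only [List.foldl_cons]
    refine le_trans ?_ (ih (stepM m x))
    simp only [stepM]; split <;> omega

/-- Invariant of A's loop: the flag says "the current max occurs exactly once so far",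
    where `c ≥ 1` is the number of occurrences of the current max `m` in the prefix already seen. -/
theorem foldA_key (vs : List Int) (m : Int) (c : Nat) (hc : 1 ≤ c) :
    vs.foldl stepA (m, decide (c = 1)) =
      (vs.foldl stepM m,
       decide ((if vs.foldl stepM m = m then c else 0) + vs.count (vs.foldl stepM m) = 1)) := by
  induction vs generalizing m c with
  | nil => simp
  | cons x vs ih =>
    simp only [List.foldl_cons]
    by_cases hx : x > m
    · have hst : stepA (m, decide (c = 1)) x = (x, decide ((1 : Nat) = 1)) := by
        simp [stepA, hx]
      have h2 : stepM m x = x := by simp [stepM, hx]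
      rw [hst, ih x 1 (le_refl 1)]
      simp only [h2]
      have hMx : x ≤ vs.foldl stepM x := le_foldM vs x
      congr 1
      simp only [decide_eq_decide, List.count_cons, beq_iff_eq]
      split_ifs <;> omega
    · by_cases he : x = m
      · subst he
        have hst : stepA (x, decide (c = 1)) x = (x, decide (c + 1 = 1)) := by
          have h3 : decide (c + 1 = 1) = false := by
            simp only [decide_eq_false_iff_not]; omega
          rw [h3]; simp [stepA]
        have h2 : stepM x x = x := by simp [stepM]
        rw [hst, ih x (c + 1) (by omega)]
        simp only [h2]
        congr 1
        simp only [decide_eq_decide, List.count_cons, beq_iff_eq]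
        split_ifs <;> omega
      · have hst : stepA (m, decide (c = 1)) x = (m, decide (c = 1)) := by
          simp [stepA, hx, he]
        have h2 : stepM m x = m := by simp [stepM, hx]
        rw [hst, ih m c hc]
        simp only [h2]
        have hMm : m ≤ vs.foldl stepM m := le_foldM vs m
        congr 1
        simp only [decide_eq_decide, List.count_cons, beq_iff_eq]
        split_ifs <;> omega

/-- `max?` of a cons (Python's first-maximal `max`) has the value the running-maximum fold computes. -/
theorem max?_cons_eq_foldM (v0 : Int) (vs : List Int) :
    ∃ w : Int, PySem.List.max? (v0 :: vs) (fun x => x) = some w ∧ w = vs.foldl stepM v0 := by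
  induction vs generalizing v0 with
  | nil => exact ⟨v0, rfl, rfl⟩
  | cons x vs ih =>
    by_cases hx : x > v0
    · obtain ⟨w, hw, hwe⟩ := ih x
      refine ⟨w, ?_, ?_⟩
      · simpa [PySem.List.max?, hx] using hw
      · simpa [stepM, hx] using hwe
    · obtain ⟨w, hw, hwe⟩ := ih v0
      refine ⟨w, ?_, ?_⟩
      · have : ¬ (v0 < x) := by omega
        simpa [PySem.List.max?, this] using hw
      · simpa [stepM, hx] using hwe

/-- A's flag equals "the max of the prefix occurs exactly once in the prefix". -/
theorem final_step (v0 : Int) (vs : List Int) :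
    (vs.foldl stepA (v0, true)).2 = decide ((v0 :: vs).count (vs.foldl stepM v0) = 1) := by
  have hA := foldA_key vs v0 1 (le_refl 1)
  rw [show decide ((1 : Nat) = 1) = true from rfl] at hA
  rw [hA]
  simp only [List.count_cons, beq_iff_eq, decide_eq_decide]
  split_ifs <;> omega

theorem main_eq (arr : List Int) (n : Int) : oneMax arr n = oneMax_alt arr n := by
  simp only [oneMax, oneMax_alt]
  set v0 := PySem.List.pyGetD arr 0 0 with hv0
  set vs := (PySem.List.pyRange 1 n 1).map (fun i => PySem.List.pyGetD arr i 0) with hvs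
  have eA : (PySem.List.pyRange 1 n 1).foldl
      (fun (s : Int × Bool) i =>
        if PySem.List.pyGetD arr i 0 > s.1 then (PySem.List.pyGetD arr i 0, true)
        else if PySem.List.pyGetD arr i 0 = s.1 then (s.1, false)
        else s)
      (v0, true) = vs.foldl stepA (v0, true) := by
    rw [hvs, List.foldl_map]; rfl
  obtain ⟨w, hw, hwe⟩ := max?_cons_eq_foldM v0 vs
  rw [eA, hw]
  simp only [Option.getD_some, hwe, PySem.List.count]
  rw [final_step]

-- ===== VERDICT (by name: the statement is the Claim_ definition above) =====
theorem oneMax_spec : Claim_equal_oneMax := by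
  intro arr n _ _
  unfold Spec_oneMax
  exact main_eq arr n
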